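-- pv_equiv track=rewrite | github.com/b-zhu524/usaco_practice | virus/socdist1.py | largest_gap
-- ===== SOURCE A (Python) =====
-- def make_dist_list(stalls):
--     dist_list = []
--     for i in range(len(stalls)):
--         if stalls[i] == 1:
--             dist_list.append(i)
--     return dist_list
--
-- def largest_gap(stalls):
--     max_dist = -1
--     dist_list = make_dist_list(stalls)
--     start, end = -1, -1
--
--     for i in range(1, len(dist_list)):
--         if dist_list[i] - dist_list[i-1] > max_dist:
--             start, end = dist_list[i-1], dist_list[i]
--             max_dist = dist_list[i] - dist_list[i-1]
--     return start, end
-- ===== SOURCE B (Python) =====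
-- def largest_gap(stalls):
--     prev = -1
--     max_dist = -1
--     start, end = -1, -1
--     for i, s in enumerate(stalls):
--         if s == 1:
--             if prev != -1 and i - prev > max_dist:
--                 start, end = prev, i
--                 max_dist = i - prev
--             prev = i
--     return start, end
-- ===== Notes on version B (the rewrite author's own statement) =====
-- stated objective: simpler
-- what changed: Replaces A's two passes (build an index list of occupied stalls, then scan consecutive pairs of that list by index) with a single enumerate pass over the stalls that tracks the previous occupied index and the best gap directly, eliminating the intermediate list.
import Mathlib
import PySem

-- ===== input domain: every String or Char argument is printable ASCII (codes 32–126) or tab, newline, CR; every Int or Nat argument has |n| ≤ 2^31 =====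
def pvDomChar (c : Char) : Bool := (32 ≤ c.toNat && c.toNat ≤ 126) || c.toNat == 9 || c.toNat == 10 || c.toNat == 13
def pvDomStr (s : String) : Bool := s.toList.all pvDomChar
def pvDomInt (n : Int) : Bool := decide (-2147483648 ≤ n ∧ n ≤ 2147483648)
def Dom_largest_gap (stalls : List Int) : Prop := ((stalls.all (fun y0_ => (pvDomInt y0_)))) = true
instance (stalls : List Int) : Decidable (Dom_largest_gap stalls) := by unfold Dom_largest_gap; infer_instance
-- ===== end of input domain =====

-- B replaces A's two passes (index list of occupied stalls, then a pair scan of it) with one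
-- enumerate pass tracking the previous occupied index; objective: simpler.


-- ===== PORT A =====
-- for i in range(len(stalls)): if stalls[i] == 1: dist_list.append(i)
def make_dist_list (stalls : List Int) : List Int :=
  (PySem.List.pyRange 0 (stalls.length : Int)).foldl
    (fun acc i => if PySem.List.pyGetD stalls i 0 = 1 then acc ++ [i] else acc) []

def largest_gap (stalls : List Int) : Int × Int :=
  let dist_list := make_dist_list stalls
  -- for i in range(1, len(dist_list)): state (max_dist, start, end)
  let r := (PySem.List.pyRange 1 (dist_list.length : Int)).foldl
    (fun (st : Int × Int × Int) i =>
      if PySem.List.pyGetD dist_list i 0 - PySem.List.pyGetD dist_list (i - 1) 0 > st.1 then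
        (PySem.List.pyGetD dist_list i 0 - PySem.List.pyGetD dist_list (i - 1) 0,
         PySem.List.pyGetD dist_list (i - 1) 0, PySem.List.pyGetD dist_list i 0)
      else st) (-1, -1, -1)
  (r.2.1, r.2.2)

-- ===== PORT B =====
-- one pass: state (prev, max_dist, start, end)
def largest_gap_alt (stalls : List Int) : Int × Int :=
  let r := (PySem.List.enumerate stalls).foldl
    (fun (st : Int × Int × Int × Int) (p : Int × Int) =>
      if p.2 = 1 then
        if st.1 ≠ -1 ∧ p.1 - st.1 > st.2.1 then
          (p.1, p.1 - st.1, st.1, p.1)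
        else (p.1, st.2.1, st.2.2.1, st.2.2.2)
      else st) (-1, -1, -1, -1)
  (r.2.2.1, r.2.2.2)

-- ===== PRECONDITION & SPEC =====
def Spec_largest_gap (stalls : List Int) (out : Int × Int) : Prop := out = largest_gap_alt stalls
instance (stalls : List Int) (out : Int × Int) : Decidable (Spec_largest_gap stalls out) := by unfold Spec_largest_gap; infer_instance

-- ===== CLAIM (what is proved, stated in full; the proofs are below) =====
def Claim_equal_largest_gap : Prop := ∀ (stalls : List Int), Dom_largest_gap stalls → Spec_largest_gap stalls (largest_gap stalls)

-- ===== LEMMAS AND PROOFS =====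

-- indices (from k) of the occupied stalls
def pvIdx : Int → List Int → List Int
  | _, [] => []
  | k, s :: t => if s = 1 then k :: pvIdx (k + 1) t else pvIdx (k + 1) t

-- A's pair scan as recursion over the tail of the index list; state (max_dist, start, end)
def pvPF3 : Int → Int → Int → Int → List Int → Int × Int × Int
  | _, md, s, e, [] => (md, s, e)
  | prev, md, s, e, p :: ps =>
    if p - prev > md then pvPF3 p (p - prev) prev p ps else pvPF3 p md s e ps

-- B's scan over the index list; state (prev, max_dist, start, end)
def pvPF4 : Int → Int → Int → Int → List Int → Int × Int × Int × Int
  | prev, md, s, e, [] => (prev, md, s, e)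
  | prev, md, s, e, p :: ps =>
    if prev ≠ -1 ∧ p - prev > md then pvPF4 p (p - prev) prev p ps else pvPF4 p md s e ps

theorem pvIdx_nonneg : ∀ (t : List Int) (k : Int), 0 ≤ k → ∀ x ∈ pvIdx k t, 0 ≤ x := by
  intro t
  induction t with
  | nil => intro k hk x hx; simp [pvIdx] at hx
  | cons s t ih =>
    intro k hk x hx
    simp only [pvIdx] at hx
    split at hx
    · rw [List.mem_cons] at hx
      rcases hx with rfl | hx
      · exact hk
      · exact ih (k + 1) (by omega) x hx
    · exact ih (k + 1) (by omega) x hx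

theorem pv_mdl (suf : List Int) : ∀ (pre acc : List Int),
    (PySem.List.pyRange ((pre.length : Int)) (((pre ++ suf).length : Int))).foldl
      (fun a i => if PySem.List.pyGetD (pre ++ suf) i 0 = 1 then a ++ [i] else a) acc
      = acc ++ pvIdx (pre.length : Int) suf := by
  induction suf with
  | nil => intro pre acc; simp [PySem.List.pyRange, pvIdx]
  | cons s t ih =>
    intro pre acc
    have hlt : (pre.length : Int) < ((pre ++ s :: t).length : Int) := by
      simp only [List.length_append, List.length_cons]; push_cast; omega
    rw [PySem.List.pyRange_one_cons hlt]
    have hget : PySem.List.pyGetD (pre ++ s :: t) (pre.length : Int) 0 = s := by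
      rw [PySem.List.pyGetD_natCast]
      simp [List.getD]
    rw [List.foldl_cons, hget]
    simp only [pvIdx]
    by_cases hs : s = 1
    · simp only [if_pos hs]
      have h := ih (pre ++ [s]) (acc ++ [(pre.length : Int)])
      simp only [List.append_assoc, List.cons_append, List.nil_append, List.length_append,
        List.length_cons, List.length_nil] at h ⊢
      push_cast at h ⊢
      ring_nf at h ⊢
      rw [h]
    · simp only [if_neg hs]
      have h := ih (pre ++ [s]) acc
      simp only [List.append_assoc, List.cons_append, List.nil_append, List.length_append,
        List.length_cons, List.length_nil] at h ⊢
      push_cast at h ⊢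
      ring_nf at h ⊢
      exact h

theorem pv_loopA (suf : List Int) : ∀ (pre : List Int) (prev md s e : Int),
    (PySem.List.pyRange ((pre.length : Int) + 1) (((pre ++ prev :: suf).length : Int))).foldl
      (fun (st : Int × Int × Int) i =>
        if PySem.List.pyGetD (pre ++ prev :: suf) i 0 - PySem.List.pyGetD (pre ++ prev :: suf) (i - 1) 0 > st.1 then
          (PySem.List.pyGetD (pre ++ prev :: suf) i 0 - PySem.List.pyGetD (pre ++ prev :: suf) (i - 1) 0,
           PySem.List.pyGetD (pre ++ prev :: suf) (i - 1) 0, PySem.List.pyGetD (pre ++ prev :: suf) i 0)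
        else st) (md, s, e)
      = pvPF3 prev md s e suf := by
  induction suf with
  | nil =>
    intro pre prev md s e
    simp [PySem.List.pyRange, pvPF3]
  | cons p ps ih =>
    intro pre prev md s e
    have hlt : (pre.length : Int) + 1 < ((pre ++ prev :: p :: ps).length : Int) := by
      simp only [List.length_append, List.length_cons]; push_cast; omega
    rw [PySem.List.pyRange_one_cons hlt]
    have hgetp : PySem.List.pyGetD (pre ++ prev :: p :: ps) ((pre.length : Int) + 1) 0 = p := by
      rw [show ((pre.length : Int) + 1) = (((pre.length + 1 : Nat)) : Int) by push_cast; ring,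
        PySem.List.pyGetD_natCast]
      have he : pre ++ prev :: p :: ps = (pre ++ [prev]) ++ p :: ps := by simp
      have hl : pre.length + 1 = (pre ++ [prev]).length := by simp
      rw [he, List.getD, hl]
      simp
    have hgetprev : PySem.List.pyGetD (pre ++ prev :: p :: ps) ((pre.length : Int) + 1 - 1) 0 = prev := by
      rw [show ((pre.length : Int) + 1 - 1) = ((pre.length : Nat) : Int) by ring,
        PySem.List.pyGetD_natCast]
      simp [List.getD]
    rw [List.foldl_cons, hgetp, hgetprev]
    simp only [pvPF3]
    by_cases hgt : p - prev > md
    · simp only [if_pos hgt]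
      have h := ih (pre ++ [prev]) p (p - prev) prev p
      simp only [List.append_assoc, List.cons_append, List.nil_append, List.length_append,
        List.length_cons, List.length_nil] at h ⊢
      push_cast at h ⊢
      ring_nf at h ⊢
      exact h
    · simp only [if_neg hgt]
      have h := ih (pre ++ [prev]) p md s e
      simp only [List.append_assoc, List.cons_append, List.nil_append, List.length_append,
        List.length_cons, List.length_nil] at h ⊢
      push_cast at h ⊢
      ring_nf at h ⊢
      exact h

theorem pv_loopB (t : List Int) : ∀ (k prev md s e : Int),
    (PySem.List.enumerate t k).foldl
      (fun (st : Int × Int × Int × Int) (p : Int × Int) =>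
        if p.2 = 1 then
          if st.1 ≠ -1 ∧ p.1 - st.1 > st.2.1 then
            (p.1, p.1 - st.1, st.1, p.1)
          else (p.1, st.2.1, st.2.2.1, st.2.2.2)
        else st) (prev, md, s, e)
      = pvPF4 prev md s e (pvIdx k t) := by
  induction t with
  | nil => intro k prev md s e; simp [PySem.List.enumerate, pvIdx, pvPF4]
  | cons x t ih =>
    intro k prev md s e
    simp only [PySem.List.enumerate, List.foldl_cons, pvIdx]
    by_cases hx : x = 1
    · rw [if_pos hx, if_pos hx]
      simp only [pvPF4]
      split
      · exact ih (k + 1) k (k - prev) prev k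
      · exact ih (k + 1) k md s e
    · rw [if_neg hx, if_neg hx]
      exact ih (k + 1) prev md s e

theorem pv_bridge : ∀ (l : List Int) (prev md s e : Int), 0 ≤ prev → (∀ x ∈ l, 0 ≤ x) →
    (pvPF4 prev md s e l).2 = pvPF3 prev md s e l := by
  intro l
  induction l with
  | nil => intro prev md s e _ _; simp [pvPF4, pvPF3]
  | cons p ps ih =>
    intro prev md s e hprev hl
    have hp : 0 ≤ p := hl p (by simp)
    have hps : ∀ x ∈ ps, 0 ≤ x := fun x hx => hl x (by simp [hx])
    simp only [pvPF4, pvPF3]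
    have hne : prev ≠ -1 := by omega
    by_cases hgt : p - prev > md
    · rw [if_pos ⟨hne, hgt⟩, if_pos hgt]
      exact ih p (p - prev) prev p hp hps
    · rw [if_neg (by tauto), if_neg hgt]
      exact ih p md s e hp hps

-- ===== VERDICT (by name: the statement is the Claim_ definition above) =====
theorem largest_gap_spec : Claim_equal_largest_gap := by
  intro stalls _
  have hmdl : make_dist_list stalls = pvIdx 0 stalls := by
    simpa [make_dist_list] using pv_mdl stalls [] []
  simp only [Spec_largest_gap, largest_gap, largest_gap_alt]
  rw [hmdl]
  rw [pv_loopB stalls 0 (-1) (-1) (-1) (-1)]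
  have hnn : ∀ x ∈ pvIdx 0 stalls, 0 ≤ x := pvIdx_nonneg stalls 0 le_rfl
  cases hidx : pvIdx 0 stalls with
  | nil => simp [PySem.List.pyRange, pvPF4]
  | cons d rest =>
    have hA := pv_loopA rest [] d (-1) (-1) (-1)
    simp only [List.length_nil, Nat.cast_zero, List.nil_append, zero_add] at hA
    rw [hA]
    simp only [pvPF4]
    rw [hidx] at hnn
    have hd : 0 ≤ d := hnn d (by simp)
    rw [if_neg (by push_neg; intro h; omega)]
    rw [pv_bridge rest d (-1) (-1) (-1) hd (fun x hx => hnn x (by simp [hx]))]
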